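-- pv_equiv track=rewrite | github.com/matanhalevy/xai_rap_battle | app_gradio_fastapi/services/voice_api.py | _build_tempo_instructions
-- ===== SOURCE A (Python) =====
-- def _build_tempo_instructions(base_instructions: str, bpm: int | None, style: str | None) -> str:
--     """Enhance style instructions with tempo context."""
--     if not bpm:
--         return base_instructions
--
--     tempo_mapping = {
--         (60, 90): "slow, deliberate",
--         (90, 120): "moderate groove",
--         (120, 150): "energetic, punchy",
--         (150, 180): "rapid-fire, intense",
--     }
--
--     tempo_desc = "moderate"
--     for (low, high), desc in tempo_mapping.items():
--         if low <= bpm < high: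
--             tempo_desc = desc
--             break
--
--     style_suffix = f" {style} style" if style else ""
--     return f"{base_instructions}. Delivery: {tempo_desc} at {bpm} BPM{style_suffix}"
-- ===== SOURCE B (Python) =====
-- def _build_tempo_instructions(base_instructions: str, bpm: int | None, style: str | None) -> str:
--     """Enhance style instructions with tempo context."""
--     if not bpm:
--         return base_instructions
--
--     descs = ["slow, deliberate", "moderate groove", "energetic, punchy", "rapid-fire, intense"]
--     idx = (bpm - 60) // 30
--     tempo_desc = descs[idx] if 0 <= idx < 4 else "moderate"
--
--     style_suffix = f" {style} style" if style else ""
--     return f"{base_instructions}. Delivery: {tempo_desc} at {bpm} BPM{style_suffix}"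
-- ===== Notes on version B (the rewrite author's own statement) =====
-- stated objective: simpler
-- what changed: Replaces the dict of (low,high) ranges and the linear scan-with-break by a closed-form index (bpm-60)//30 into a list of descriptions, exploiting that the bins are uniform 30-BPM windows from 60 to 180.
import Mathlib
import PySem

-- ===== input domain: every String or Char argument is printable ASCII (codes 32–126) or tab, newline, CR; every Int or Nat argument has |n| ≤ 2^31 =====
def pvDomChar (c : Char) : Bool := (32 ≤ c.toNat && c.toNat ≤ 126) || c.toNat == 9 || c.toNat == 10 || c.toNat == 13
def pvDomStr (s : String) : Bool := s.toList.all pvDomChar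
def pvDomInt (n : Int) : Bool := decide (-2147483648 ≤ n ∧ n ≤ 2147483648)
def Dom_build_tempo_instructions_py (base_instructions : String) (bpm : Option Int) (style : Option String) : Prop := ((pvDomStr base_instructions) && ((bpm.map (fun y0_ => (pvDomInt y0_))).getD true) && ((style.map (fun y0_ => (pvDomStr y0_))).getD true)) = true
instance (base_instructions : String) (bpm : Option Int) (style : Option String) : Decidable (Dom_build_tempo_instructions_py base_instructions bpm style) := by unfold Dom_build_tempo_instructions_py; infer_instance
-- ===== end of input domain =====

-- B replaces the dict-and-scan over 30-BPM bins by a closed-form index (bpm-60)//30; objective: simpler.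


-- ===== PORT A =====
-- the for-loop over tempo_mapping.items() with break: first matching range wins
def pvTempoLoop : List ((Int × Int) × String) → Int → String
  | [], _ => "moderate"
  | ((low, high), desc) :: rest, bpm =>
      if low ≤ bpm ∧ bpm < high then desc else pvTempoLoop rest bpm

def build_tempo_instructions_py (base_instructions : String) (bpm : Option Int) (style : Option String) : String :=
  match bpm with
  | none => base_instructions
  | some b =>
    if b = 0 then base_instructions
    else
      let tempo_mapping : List ((Int × Int) × String) :=
        [((60, 90), "slow, deliberate"), ((90, 120), "moderate groove"),
         ((120, 150), "energetic, punchy"), ((150, 180), "rapid-fire, intense")]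
      let tempo_desc := pvTempoLoop tempo_mapping b
      let style_suffix :=
        match style with
        | some s => if s = "" then "" else " " ++ s ++ " style"
        | none => ""
      base_instructions ++ ". Delivery: " ++ tempo_desc ++ " at " ++ PySem.Int.toStr b ++ " BPM" ++ style_suffix

-- ===== PORT B =====
def build_tempo_instructions_py_alt (base_instructions : String) (bpm : Option Int) (style : Option String) : String :=
  match bpm with
  | none => base_instructions
  | some b =>
    if b = 0 then base_instructions
    else
      let descs := ["slow, deliberate", "moderate groove", "energetic, punchy", "rapid-fire, intense"]
      let idx := PySem.Int.floordiv (b - 60) 30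
      let tempo_desc := if 0 ≤ idx ∧ idx < 4 then (PySem.List.pyGet? descs idx).getD "moderate" else "moderate"
      let style_suffix :=
        match style with
        | some s => if s = "" then "" else " " ++ s ++ " style"
        | none => ""
      base_instructions ++ ". Delivery: " ++ tempo_desc ++ " at " ++ PySem.Int.toStr b ++ " BPM" ++ style_suffix

-- ===== PRECONDITION & SPEC =====
def Spec_build_tempo_instructions_py (base_instructions : String) (bpm : Option Int) (style : Option String) (out : String) : Prop := out = build_tempo_instructions_py_alt base_instructions bpm style
instance (base_instructions : String) (bpm : Option Int) (style : Option String) (out : String) : Decidable (Spec_build_tempo_instructions_py base_instructions bpm style out) := by unfold Spec_build_tempo_instructions_py; infer_instance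

-- ===== CLAIM (what is proved, stated in full; the proofs are below) =====
def Claim_equal_build_tempo_instructions_py : Prop := ∀ (base_instructions : String) (bpm : Option Int) (style : Option String), Dom_build_tempo_instructions_py base_instructions bpm style → Spec_build_tempo_instructions_py base_instructions bpm style (build_tempo_instructions_py base_instructions bpm style)

-- ===== LEMMAS AND PROOFS =====

-- the scan over the four bins equals the closed-form indexed lookup
lemma pvTempoLoop_eq_closed (b : Int) :
    pvTempoLoop [((60, 90), "slow, deliberate"), ((90, 120), "moderate groove"),
                 ((120, 150), "energetic, punchy"), ((150, 180), "rapid-fire, intense")] b =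
    (let idx := PySem.Int.floordiv (b - 60) 30
     if 0 ≤ idx ∧ idx < 4 then
       (PySem.List.pyGet? ["slow, deliberate", "moderate groove", "energetic, punchy", "rapid-fire, intense"] idx).getD "moderate"
     else "moderate") := by
  have hfd : PySem.Int.floordiv (b - 60) 30 = (b - 60) / 30 :=
    PySem.Int.floordiv_eq_ediv_of_pos (by norm_num)
  simp only [pvTempoLoop, hfd]
  rcases lt_or_ge b 60 with h | h
  · have h0 : (b - 60) / 30 < 0 := by omega
    split_ifs <;> first | rfl | omega
  · rcases lt_or_ge b 90 with h90 | h90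
    · have : (b - 60) / 30 = 0 := by omega
      rw [this]
      norm_num [PySem.List.pyGet?, PySem.List.pyIdx?]
      split_ifs <;> first | rfl | omega
    · rcases lt_or_ge b 120 with h120 | h120
      · have : (b - 60) / 30 = 1 := by omega
        rw [this]
        norm_num [PySem.List.pyGet?, PySem.List.pyIdx?]
        split_ifs <;> first | rfl | omega
      · rcases lt_or_ge b 150 with h150 | h150
        · have : (b - 60) / 30 = 2 := by omega
          rw [this]
          norm_num [PySem.List.pyGet?, PySem.List.pyIdx?]
          split_ifs <;> first | rfl | omega
        · rcases lt_or_ge b 180 with h180 | h180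
          · have : (b - 60) / 30 = 3 := by omega
            rw [this]
            norm_num [PySem.List.pyGet?, PySem.List.pyIdx?]
            split_ifs <;> first | rfl | omega
          · have : 4 ≤ (b - 60) / 30 := by omega
            split_ifs <;> first | rfl | omega
-- ===== VERDICT (by name: the statement is the Claim_ definition above) =====
theorem build_tempo_instructions_py_spec : Claim_equal_build_tempo_instructions_py := by
  intro base bpm style _
  unfold Spec_build_tempo_instructions_py build_tempo_instructions_py build_tempo_instructions_py_alt
  rcases bpm with _ | b
  · rfl
  · simp only []
    by_cases hb : b = 0
    · simp [hb]
    · simp only [hb, if_false]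
      rw [pvTempoLoop_eq_closed]
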